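-- pv_equiv track=rewrite | github.com/eliottcassidy2000/math | 04-computation/recurrence_keys_deep.py | gen_tournaments
-- ===== SOURCE A (Python) =====
-- def gen_tournaments(n):
--     """Generate all tournaments on n vertices as adjacency tuples."""
--     edges = [(i,j) for i in range(n) for j in range(i+1,n)]
--     results = []
--     for bits in range(2**len(edges)):
--         adj = [[False]*n for _ in range(n)]
--         for idx, (i,j) in enumerate(edges):
--             if bits & (1 << idx):
--                 adj[i][j] = True
--             else:
--                 adj[j][i] = True
--         results.append(adj)
--     return results
-- ===== SOURCE B (Python) =====
-- def gen_tournaments(n):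
--     """Generate all tournaments on n vertices as adjacency tuples."""
--     edges = [(i,j) for i in range(n) for j in range(i+1,n)]
--     results = [[[False]*n for _ in range(n)]]
--     for i, j in edges:
--         # each already-built partial tournament splits in two: edge (i,j) oriented
--         # j->i (the 0 choice, kept first) or i->j; later edges are more significant,
--         # so the emitted order matches A's increasing-bits order.
--         new = []
--         for adj in results:
--             m = [row[:] for row in adj]
--             m[j][i] = True
--             new.append(m)
--         for adj in results:
--             m = [row[:] for row in adj]
--             m[i][j] = True
--             new.append(m)
--         results = new
--     return results
-- ===== Notes on version B (the rewrite author's own statement) =====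
-- stated objective: alternative
-- what changed: Replaces A's bitmask enumeration (decode each bits in range(2**E) into a fresh matrix) by an iterative doubling construction: one pass over the edge list that, per edge, splits every partial tournament into its two orientations (0-orientation block first, later edges more significant), yielding the same matrices in the same order.
import Mathlib
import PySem

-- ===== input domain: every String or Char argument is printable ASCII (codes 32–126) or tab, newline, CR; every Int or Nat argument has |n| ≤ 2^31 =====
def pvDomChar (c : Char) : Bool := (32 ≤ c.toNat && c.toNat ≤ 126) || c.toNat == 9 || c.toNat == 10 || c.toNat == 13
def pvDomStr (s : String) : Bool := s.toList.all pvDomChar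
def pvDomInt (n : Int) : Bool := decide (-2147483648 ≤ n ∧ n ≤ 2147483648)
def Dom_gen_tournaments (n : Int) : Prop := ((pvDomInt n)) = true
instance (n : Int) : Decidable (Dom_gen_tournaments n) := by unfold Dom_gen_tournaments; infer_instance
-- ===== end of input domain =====

-- B replaces A's bitmask enumeration (decode each bits in range(2**E)) by backtracking
-- recursion over the edge list, emitting matrices in the same order; objective: alternative.

-- ===== PORT A =====
-- Python 'adj[i][j] = True': exact for 0 ≤ i, j < len adj, which holds for every index
-- used by either program (all indices come from range(n)). Shared by both ports because
-- both Python programs perform this very assignment.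
def pvSetCell (adj : List (List Bool)) (i j : Int) : List (List Bool) :=
  adj.set i.toNat ((adj.getD i.toNat []).set j.toNat true)

-- '[(i,j) for i in range(n) for j in range(i+1,n)]' — the identical line opens A and B.
def pvEdges (n : Int) : List (Int × Int) :=
  (PySem.List.pyRange 0 n 1).flatMap (fun i => (PySem.List.pyRange (i+1) n 1).map (fun j => (i, j)))

-- literal port of A: for bits in range(2**E) decode bits into a fresh matrix
-- ('1 << idx' ported as '(1 : Int) <<< idx.toNat' — exact since enumerate indices are ≥ 0)
def gen_tournaments (n : Int) : List (List (List Bool)) :=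
  let edges := pvEdges n
  (PySem.List.pyRange 0 ((2:Int) ^ edges.length) 1).foldl
    (fun results bits =>
      let adj0 := List.replicate n.toNat (List.replicate n.toNat false)
      let adj := (PySem.List.enumerate edges).foldl
        (fun adj p =>
          if PySem.Int.band bits ((1:Int) <<< p.1.toNat) ≠ 0 then pvSetCell adj p.2.1 p.2.2
          else pvSetCell adj p.2.2 p.2.1) adj0
      results ++ [adj]) []

-- ===== PORT B =====
-- Source B's doubling loop: each pass over 'results' appends a modified fresh copy per
-- matrix (= List.map; the copy is the value pvSetCell produces), 0-orientation block
-- first, then the 1-orientation block.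
def gen_tournaments_alt (n : Int) : List (List (List Bool)) :=
  (pvEdges n).foldl
    (fun results e =>
      results.map (fun adj => pvSetCell adj e.2 e.1)
        ++ results.map (fun adj => pvSetCell adj e.1 e.2))
    [List.replicate n.toNat (List.replicate n.toNat false)]

-- ===== PRECONDITION & SPEC =====
def Spec_gen_tournaments (n : Int) (out : List (List (List Bool))) : Prop := out = gen_tournaments_alt n
instance (n : Int) (out : List (List (List Bool))) : Decidable (Spec_gen_tournaments n out) := by unfold Spec_gen_tournaments; infer_instance

-- ===== CLAIM (what is proved, stated in full; the proofs are below) =====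
def Claim_equal_gen_tournaments : Prop := ∀ (n : Int), Dom_gen_tournaments n → Spec_gen_tournaments n (gen_tournaments n)

-- ===== LEMMAS AND PROOFS =====

-- A's inner loop re-expressed with an explicit running index.
def pvFoldE (bits : Int) : Nat → List (Int × Int) → List (List Bool) → List (List Bool)
  | _, [], adj => adj
  | k, e :: es, adj =>
    pvFoldE bits (k+1) es
      (if PySem.Int.band bits ((1:Int) <<< k) ≠ 0 then pvSetCell adj e.1 e.2
       else pvSetCell adj e.2 e.1)

lemma pvEnum_foldl (bits : Int) (es : List (Int × Int)) : ∀ (k : Nat) (adj : List (List Bool)),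
    (PySem.List.enumerate es (k : Int)).foldl
      (fun adj p =>
        if PySem.Int.band bits ((1:Int) <<< p.1.toNat) ≠ 0 then pvSetCell adj p.2.1 p.2.2
        else pvSetCell adj p.2.2 p.2.1) adj = pvFoldE bits k es adj := by
  induction es with
  | nil => intro k adj; simp [PySem.List.enumerate_nil, pvFoldE]
  | cons e es ih =>
    intro k adj
    rw [PySem.List.enumerate_cons]
    simp only [List.foldl_cons]
    have : ((k : Int) + 1) = ((k + 1 : Nat) : Int) := by push_cast; ring
    rw [this, ih]
    simp only [pvFoldE]
    norm_cast
    rw [show ((1:Int) <<< ((k:Int))) = (((1 <<< k : Nat)) : Int) from by exact_mod_cast Int.shiftLeft_natCast 1 k]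

-- bit facts, through the natCast bridge
lemma pvBand_low (b m : Nat) (hb : b < 2 ^ m) :
    PySem.Int.band (Int.ofNat b) ((1:Int) <<< m) = 0 := by
  have h1 : ((1:Int) <<< m) = ((1 <<< m : Nat) : Int) := by simp
  rw [h1, show (Int.ofNat b) = ((b : Nat) : Int) from rfl, PySem.Int.band_natCast]
  have : b &&& 1 <<< m = 0 := by
    rw [Nat.shiftLeft_eq, one_mul, Nat.and_two_pow, Nat.testBit_lt_two_pow hb]
    simp
  simp [this]

lemma pvBand_high (b m : Nat) (hb : b < 2 ^ m) :
    PySem.Int.band (Int.ofNat (2 ^ m + b)) ((1:Int) <<< m) ≠ 0 := by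
  have h1 : ((1:Int) <<< m) = ((1 <<< m : Nat) : Int) := by simp
  rw [h1, show (Int.ofNat (2^m + b)) = ((2^m + b : Nat) : Int) from rfl, PySem.Int.band_natCast]
  have ht : (2 ^ m + b).testBit m = true := by
    rw [Nat.testBit_two_pow_add_eq, Nat.testBit_lt_two_pow hb]; rfl
  have : (2 ^ m + b) &&& 1 <<< m = 2 ^ m := by
    rw [Nat.shiftLeft_eq, one_mul, Nat.and_two_pow, ht]; simp
  rw [this]
  positivity

lemma pvBand_add_pow (b m idx : Nat) (hidx : idx < m) :
    PySem.Int.band (Int.ofNat (2 ^ m + b)) ((1:Int) <<< idx)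
      = PySem.Int.band (Int.ofNat b) ((1:Int) <<< idx) := by
  have h1 : ((1:Int) <<< idx) = ((1 <<< idx : Nat) : Int) := by simp
  rw [h1, show (Int.ofNat (2^m + b)) = ((2^m + b : Nat) : Int) from rfl,
    show (Int.ofNat b) = ((b : Nat) : Int) from rfl, PySem.Int.band_natCast, PySem.Int.band_natCast]
  rw [Nat.shiftLeft_eq, one_mul, Nat.and_two_pow, Nat.and_two_pow,
    Nat.testBit_two_pow_add_gt hidx]

lemma pvFoldE_congr (bits bits' : Int) (es : List (Int × Int)) : ∀ (k : Nat) (adj : List (List Bool)),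
    (∀ idx : Nat, k ≤ idx → idx < k + es.length →
        PySem.Int.band bits ((1:Int) <<< idx) = PySem.Int.band bits' ((1:Int) <<< idx)) →
    pvFoldE bits k es adj = pvFoldE bits' k es adj := by
  induction es with
  | nil => intro k adj _; simp [pvFoldE]
  | cons e es ih =>
    intro k adj h
    simp only [pvFoldE]
    rw [h k (le_refl k) (by simp), ih (k+1) _ (fun idx h1 h2 => h idx (by omega) (by simp at h2 ⊢; omega))]

lemma pvFoldE_append (bits : Int) (l1 l2 : List (Int × Int)) : ∀ (k : Nat) (adj : List (List Bool)),
    pvFoldE bits k (l1 ++ l2) adj = pvFoldE bits (k + l1.length) l2 (pvFoldE bits k l1 adj) := by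
  induction l1 with
  | nil => intro k adj; simp [pvFoldE]
  | cons e l1 ih =>
    intro k adj
    simp only [List.cons_append, pvFoldE, ih, List.length_cons]
    ring_nf

-- main correspondence: B's doubling over the edge list = A's decoding of all bit masks
lemma pvFoldl_eq (adj : List (List Bool)) (es : List (Int × Int)) :
    es.foldl
      (fun results e =>
        results.map (fun a => pvSetCell a e.2 e.1) ++ results.map (fun a => pvSetCell a e.1 e.2))
      [adj]
      = (List.range (2 ^ es.length)).map (fun b => pvFoldE (Int.ofNat b) 0 es adj) := by
  induction es using List.reverseRecOn with
  | nil => simp [pvFoldE]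
  | append_singleton es e ih =>
    set m := es.length with hm
    rw [List.foldl_append, List.foldl_cons, List.foldl_nil, ih]
    rw [List.length_append, List.length_singleton, pow_succ, mul_two, List.range_add,
      List.map_append, List.map_map, List.map_map, List.map_map]
    congr 1
    · -- low half: bit m is 0, edge e takes the j->i orientation
      apply List.map_congr_left
      intro b hb
      have hblt : b < 2 ^ m := List.mem_range.mp hb
      simp only [Function.comp]
      rw [pvFoldE_append, Nat.zero_add, ← hm]
      simp only [pvFoldE]
      rw [if_neg (by simpa using pvBand_low b m hblt)]
    · -- high half: bits = 2^m + b, bit m is 1, lower bits unchanged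
      apply List.map_congr_left
      intro b hb
      have hblt : b < 2 ^ m := List.mem_range.mp hb
      simp only [Function.comp]
      rw [pvFoldE_append, Nat.zero_add, ← hm]
      simp only [pvFoldE]
      rw [if_pos (by simpa using pvBand_high b m hblt)]
      rw [pvFoldE_congr (Int.ofNat (2 ^ m + b)) (Int.ofNat b) es 0 adj
        (fun idx h1 h2 => pvBand_add_pow b m idx (by simp at h2; omega))]

-- ===== VERDICT (by name: the statement is the Claim_ definition above) =====
theorem gen_tournaments_spec : Claim_equal_gen_tournaments := by
  intro n _
  unfold Spec_gen_tournaments gen_tournaments gen_tournaments_alt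
  simp only
  rw [PySem.List.foldl_append_singleton_eq_map, List.nil_append]
  have hpow : ((2:Int) ^ (pvEdges n).length) = ((2 ^ (pvEdges n).length : Nat) : Int) := by
    push_cast; ring
  rw [hpow, PySem.List.pyRange_zero_natCast, List.map_map, pvFoldl_eq]
  apply List.map_congr_left
  intro b _
  simp only [Function.comp]
  exact pvEnum_foldl _ _ 0 _
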